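-- pv_equiv track=rewrite | github.com/banteg/crimson | scripts/ui_render_trace_reduce.py | _clean_prefix
-- ===== SOURCE A (Python) =====
-- def _clean_prefix(s: str | None, allowed: str) -> str | None:
--     if not s:
--         return None
--     out: list[str] = []
--     for ch in str(s):
--         if ch in allowed:
--             out.append(ch)
--         else:
--             break
--     if not out:
--         return None
--     return "".join(out)
-- ===== SOURCE B (Python) =====
-- def _clean_prefix(s, allowed):
--     if not s:
--         return None
--     s = str(s)
--     cut = next((i for i, ch in enumerate(s) if ch not in allowed), len(s))
--     return s[:cut] or None
-- ===== Notes on version B (the rewrite author's own statement) =====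
-- stated objective: simpler
-- what changed: Instead of accumulating allowed characters in a list with a break and joining them, B locates the first disallowed character's index (via enumerate) and slices the string up to it, using 'or None' for the empty result.
import Mathlib
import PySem

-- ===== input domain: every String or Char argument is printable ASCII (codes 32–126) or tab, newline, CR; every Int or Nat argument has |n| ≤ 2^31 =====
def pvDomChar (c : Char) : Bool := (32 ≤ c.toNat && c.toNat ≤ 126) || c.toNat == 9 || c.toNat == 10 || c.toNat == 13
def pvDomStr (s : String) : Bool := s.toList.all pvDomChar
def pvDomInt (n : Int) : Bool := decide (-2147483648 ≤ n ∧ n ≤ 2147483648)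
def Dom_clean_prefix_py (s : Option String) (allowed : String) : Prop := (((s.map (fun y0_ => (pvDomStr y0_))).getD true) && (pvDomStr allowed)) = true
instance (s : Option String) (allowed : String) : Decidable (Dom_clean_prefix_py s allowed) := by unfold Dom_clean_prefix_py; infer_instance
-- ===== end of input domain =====

-- B is simpler: it finds the index of the first disallowed character and slices, instead of
-- accumulating allowed characters in a list with a break and joining them.

-- ===== PORT A =====
-- the for/append/break loop of A: state is the accumulated `out`
def cleanLoopA (allowed : List Char) : List Char → List Char → List Char
  | out, [] => out
  | out, c :: rest => if allowed.contains c then cleanLoopA allowed (out ++ [c]) rest else out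

def clean_prefix_py (s : Option String) (allowed : String) : Option String :=
  match s with
  | none => none
  | some t =>
    if t.toList = [] then none            -- `if not s`
    else
      let out := cleanLoopA allowed.toList [] t.toList
      if out = [] then none else some (String.mk out)   -- "".join(out)

-- ===== PORT B =====
def clean_prefix_py_alt (s : Option String) (allowed : String) : Option String :=
  match s with
  | none => none
  | some t =>
    if t.toList = [] then none            -- `if not s`
    else
      let cs := t.toList
      -- next((i for i, ch in enumerate(s) if ch not in allowed), len(s))
      let cut : Int :=
        (((PySem.List.enumerate cs 0).find? (fun p => !(allowed.toList.contains p.2))).map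
          (fun p => p.1)).getD (cs.length : Int)
      let pre := PySem.List.slice cs none (some cut)    -- s[:cut]
      if pre = [] then none else some (String.mk pre)   -- `or None`

-- ===== PRECONDITION & SPEC =====
def Spec_clean_prefix_py (s : Option String) (allowed : String) (out : Option String) : Prop := out = clean_prefix_py_alt s allowed
instance (s : Option String) (allowed : String) (out : Option String) : Decidable (Spec_clean_prefix_py s allowed out) := by unfold Spec_clean_prefix_py; infer_instance

-- ===== CLAIM (what is proved, stated in full; the proofs are below) =====
def Claim_equal_clean_prefix_py : Prop := ∀ (s : Option String) (allowed : String), Dom_clean_prefix_py s allowed → Spec_clean_prefix_py s allowed (clean_prefix_py s allowed)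

-- ===== LEMMAS AND PROOFS =====

theorem cleanLoopA_eq_takeWhile (allowed : List Char) (cs out : List Char) :
    cleanLoopA allowed out cs = out ++ cs.takeWhile (fun c => allowed.contains c) := by
  induction cs generalizing out with
  | nil => simp [cleanLoopA]
  | cons c rest ih =>
    by_cases h : allowed.contains c = true
    · have hm : c ∈ allowed := by simpa using h
      simp [cleanLoopA, hm, List.takeWhile_cons, ih]
    · have hm : c ∉ allowed := by simpa using h
      simp [cleanLoopA, hm, List.takeWhile_cons]

theorem findCut (allowed cs : List Char) (s : Int) :
    (((PySem.List.enumerate cs s).find? (fun p => !(allowed.contains p.2))).map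
      (fun p => p.1)).getD (s + (cs.length : Int))
    = s + ((cs.takeWhile (fun c => allowed.contains c)).length : Int) := by
  induction cs generalizing s with
  | nil => simp [PySem.List.enumerate_nil]
  | cons c rest ih =>
    rw [PySem.List.enumerate_cons]
    by_cases h : allowed.contains c = true
    · rw [List.find?_cons_of_neg (by simpa using h), List.takeWhile_cons_of_pos (by simpa using h)]
      have hI := ih (s + 1)
      rw [List.length_cons, List.length_cons]
      rw [show s + (((rest.length + 1 : Nat)) : Int) = (s + 1) + (rest.length : Int) by push_cast; ring, hI]
      push_cast; ring
    · have h' : allowed.contains c = false := by simpa using h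
      rw [List.find?_cons_of_pos (by simpa using h'), List.takeWhile_cons_of_neg (by simpa using h')]
      simp

theorem prefix_eq (allowed cs : List Char) :
    cleanLoopA allowed [] cs
    = PySem.List.slice cs none (some
        ((((PySem.List.enumerate cs 0).find? (fun p => !(allowed.contains p.2))).map
          (fun p => p.1)).getD (cs.length : Int))) := by
  have hc := findCut allowed cs 0
  rw [zero_add, zero_add] at hc
  rw [cleanLoopA_eq_takeWhile, hc, PySem.List.slice_to_natCast, List.nil_append]
  exact List.prefix_iff_eq_take.mp (List.takeWhile_prefix _)

-- ===== VERDICT (by name: the statement is the Claim_ definition above) =====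
theorem clean_prefix_py_spec : Claim_equal_clean_prefix_py := by
  intro s allowed _
  unfold Spec_clean_prefix_py clean_prefix_py clean_prefix_py_alt
  cases s with
  | none => rfl
  | some t => simp only [prefix_eq]
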